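-- pv_equiv track=rewrite | github.com/LLNL/FPChecker | tests/llvm/dynamic/test_warnings_dont_abort/test_warnings_dont_abort.py | checkWarningsDontRepeat
-- ===== SOURCE A (Python) =====
-- def checkWarningsDontRepeat(out):
--     cache = {}
--     for l in out:
--         if "#FPCHECKER: Warning at dot_product.cu:" in l:
--             if l not in cache.keys():
--                 cache[l] = 1
--             else:
--                 cache[l] = cache[l] + 1
--
--     repeated = False
--     for k in cache.keys():
--         if cache[k] > 1:
--             repeated = True
--             break
--
--     return (not repeated)
-- ===== SOURCE B (Python) =====
-- def checkWarningsDontRepeat(out):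
--     marker = "#FPCHECKER: Warning at dot_product.cu:"
--     ms = sorted(l for l in out if marker in l)
--     return all(a != b for a, b in zip(ms, ms[1:]))
-- ===== Notes on version B (the rewrite author's own statement) =====
-- stated objective: alternative
-- what changed: Replaced A's hash-count dictionary plus a separate count>1 scanning loop with sort-then-adjacent-scan: sort the marker-matching lines and check that no two adjacent sorted entries are equal (duplicates are adjacent after sorting), so no counting structure is built at all.
import Mathlib
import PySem

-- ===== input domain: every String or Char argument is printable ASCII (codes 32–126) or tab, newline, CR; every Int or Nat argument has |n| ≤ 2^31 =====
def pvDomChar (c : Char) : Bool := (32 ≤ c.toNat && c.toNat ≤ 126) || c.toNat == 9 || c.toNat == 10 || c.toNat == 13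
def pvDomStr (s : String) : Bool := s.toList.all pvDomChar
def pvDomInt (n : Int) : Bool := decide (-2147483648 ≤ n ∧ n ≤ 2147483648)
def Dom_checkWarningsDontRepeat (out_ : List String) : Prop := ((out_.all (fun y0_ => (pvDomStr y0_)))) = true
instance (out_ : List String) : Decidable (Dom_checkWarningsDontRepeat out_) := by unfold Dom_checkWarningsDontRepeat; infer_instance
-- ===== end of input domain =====

-- B replaces A's hash-count dictionary and separate count>1 scan by sorting the matching lines and checking no two adjacent entries are equal (alternative algorithm; return value only).

-- ===== PORT A =====
-- the second loop of A: scan the keys, break on the first count > 1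
def scanRepeatedA (cache : PySem.Dict String Int) : List String → Bool
  | [] => false
  | k :: ks => if cache.getD k 0 > 1 then true else scanRepeatedA cache ks

def checkWarningsDontRepeat (out_ : List String) : Bool :=
  let cache : PySem.Dict String Int := out_.foldl
    (fun cache l =>
      if PySem.Str.isIn "#FPCHECKER: Warning at dot_product.cu:" l then
        if !(cache.contains l) then cache.insert l 1
        else cache.insert l (cache.getD l 0 + 1)
      else cache)
    PySem.Dict.empty
  let repeated := scanRepeatedA cache cache.keys
  !repeated

-- ===== PORT B =====
def checkWarningsDontRepeat_alt (out_ : List String) : Bool :=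
  let marker := "#FPCHECKER: Warning at dot_product.cu:"
  let ms := PySem.List.sorted (out_.filter (fun l => PySem.Str.isIn marker l)) (fun x => x) false
  (ms.zip ms.tail).all (fun p => p.1 != p.2)

-- ===== PRECONDITION & SPEC =====
def Spec_checkWarningsDontRepeat (out_ : List String) (out : Bool) : Prop := out = checkWarningsDontRepeat_alt out_
instance (out_ : List String) (out : Bool) : Decidable (Spec_checkWarningsDontRepeat out_ out) := by unfold Spec_checkWarningsDontRepeat; infer_instance

-- ===== CLAIM (what is proved, stated in full; the proofs are below) =====
def Claim_equal_checkWarningsDontRepeat : Prop := ∀ (out_ : List String), Dom_checkWarningsDontRepeat out_ → Spec_checkWarningsDontRepeat out_ (checkWarningsDontRepeat out_)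

-- ===== LEMMAS AND PROOFS =====

-- A's counting loop body is the standard insert-getD-add-one step
theorem stepA_eq (cache : PySem.Dict String Int) (l : String) :
    (if !(cache.contains l) then cache.insert l 1
     else cache.insert l (cache.getD l 0 + 1)) = cache.insert l (cache.getD l 0 + 1) := by
  by_cases h : cache.contains l = true
  · simp [h]
  · simp only [Bool.not_eq_true] at h
    simp [PySem.Dict.getD_of_not_contains, h]

-- A's dict is the counter of the filtered list
theorem cacheA_eq (out_ : List String) :
    out_.foldl
      (fun cache l =>
        if PySem.Str.isIn "#FPCHECKER: Warning at dot_product.cu:" l then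
          if !(cache.contains l) then cache.insert l 1
          else cache.insert l (cache.getD l 0 + 1)
        else cache)
      PySem.Dict.empty
    = PySem.Dict.counter (out_.filter (fun l => PySem.Str.isIn "#FPCHECKER: Warning at dot_product.cu:" l)) := by
  have h := PySem.List.foldl_if_eq_foldl_filter
    (p := fun l => PySem.Str.isIn "#FPCHECKER: Warning at dot_product.cu:" l)
    (f := fun (cache : PySem.Dict String Int) l => cache.insert l (cache.getD l 0 + 1))
    (l := out_) (init := PySem.Dict.empty)
  calc out_.foldl _ PySem.Dict.empty
      = out_.foldl (fun (cache : PySem.Dict String Int) l =>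
          if PySem.Str.isIn "#FPCHECKER: Warning at dot_product.cu:" l then
            cache.insert l (cache.getD l 0 + 1) else cache) PySem.Dict.empty := by
        have hfun : (fun (cache : PySem.Dict String Int) l =>
            if PySem.Str.isIn "#FPCHECKER: Warning at dot_product.cu:" l then
              if !(cache.contains l) then cache.insert l 1
              else cache.insert l (cache.getD l 0 + 1)
            else cache)
          = (fun (cache : PySem.Dict String Int) l =>
            if PySem.Str.isIn "#FPCHECKER: Warning at dot_product.cu:" l then
              cache.insert l (cache.getD l 0 + 1) else cache) := by
          funext cache l
          by_cases hp : PySem.Str.isIn "#FPCHECKER: Warning at dot_product.cu:" l = true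
          · simp only [hp, if_true, stepA_eq]
          · simp only [hp, Bool.false_eq_true, if_false]
        rw [hfun]
    _ = _ := by
        rw [← PySem.Dict.foldl_insert_getD_add_one_eq_counter,
            ← PySem.List.foldl_if_eq_foldl_filter]

-- the break-scan is List.any
theorem scanRepeatedA_eq_any (cache : PySem.Dict String Int) (ks : List String) :
    scanRepeatedA cache ks = ks.any (fun k => decide (cache.getD k 0 > 1)) := by
  induction ks with
  | nil => rfl
  | cons k ks ih =>
    simp only [scanRepeatedA, List.any_cons, ← ih]
    by_cases h : cache.getD k 0 > 1 <;> simp [h]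

-- A's value on the filtered list is "no duplicates"
theorem portA_eq_nodup (out_ : List String) :
    checkWarningsDontRepeat out_
      = decide (out_.filter (fun l => PySem.Str.isIn "#FPCHECKER: Warning at dot_product.cu:" l)).Nodup := by
  unfold checkWarningsDontRepeat
  simp only [cacheA_eq, scanRepeatedA_eq_any, PySem.Dict.keys_counter]
  set ms := out_.filter (fun l => PySem.Str.isIn "#FPCHECKER: Warning at dot_product.cu:" l) with hms
  have hiff : ((PySem.Set.ofList ms).any
      (fun k => decide ((PySem.Dict.counter ms).getD k 0 > 1)) = false)
      ↔ ms.Nodup := by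
    rw [List.any_eq_false]
    constructor
    · intro h
      rw [List.nodup_iff_count_le_one]
      intro a
      by_cases ha : a ∈ ms
      · have := h a ((PySem.Set.mem_ofList _ _).2 ha)
        rw [PySem.Dict.getD_counter] at this
        simp only [decide_eq_true_eq, not_lt] at this
        exact_mod_cast this
      · simp [List.count_eq_zero_of_not_mem ha]
    · intro hnd k hk
      rw [PySem.Dict.getD_counter]
      rw [List.nodup_iff_count_le_one] at hnd
      have := hnd k
      simp only [decide_eq_true_eq, not_lt]
      exact_mod_cast this
  by_cases hnd : ms.Nodup
  · have h1 := hiff.2 hnd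
    rw [h1]
    simp [hnd]
  · have h1 : ((PySem.Set.ofList ms).any
        (fun k => decide ((PySem.Dict.counter ms).getD k 0 > 1))) = true := by
      by_contra h
      exact hnd (hiff.1 (by simpa using h))
    rw [h1]
    simp [hnd]

-- on a list sorted nondecreasingly, "all adjacent pairs distinct" is exactly Nodup
theorem adjAll_eq_nodup : ∀ (l : List String), l.Pairwise (· ≤ ·) →
    ((l.zip l.tail).all (fun p => p.1 != p.2)) = decide l.Nodup := by
  intro l
  induction l with
  | nil => intro _; rfl
  | cons a t ih =>
    intro hp
    cases t with
    | nil => simp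
    | cons b t' =>
      have hp' : (b :: t').Pairwise (· ≤ ·) := hp.of_cons
      have hab : a ≤ b := (List.pairwise_cons.1 hp).1 b (by simp)
      have ihr := ih hp'
      simp only [List.tail_cons, List.zip_cons_cons, List.all_cons, ihr]
      by_cases hne : a = b
      · subst hne
        simp
      · have hlt : a < b := lt_of_le_of_ne hab hne
        have hnotmem : a ∉ b :: t' := by
          intro hmem
          rcases List.mem_cons.1 hmem with h | h
          · exact hne h
          · have hbx : b ≤ a := (List.pairwise_cons.1 hp').1 a h
            exact absurd (lt_of_lt_of_le hlt hbx) (lt_irrefl a)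
        have hab' : (a != b) = true := by simp [hne]
        rw [List.tail_cons] at ihr
        simp [hab', ihr, List.nodup_cons, hnotmem]

theorem checkWarningsDontRepeat_spec' (out_ : List String) :
    checkWarningsDontRepeat out_ = checkWarningsDontRepeat_alt out_ := by
  unfold checkWarningsDontRepeat_alt
  rw [portA_eq_nodup]
  set ms := out_.filter (fun l => PySem.Str.isIn "#FPCHECKER: Warning at dot_product.cu:" l) with hms
  have hperm : (PySem.List.sorted ms (fun x => x) false).Perm ms := PySem.List.sorted_perm ms (fun x => x) false
  have hpw : (PySem.List.sorted ms (fun x => x) false).Pairwise (· ≤ ·) := by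
    simpa using PySem.List.sorted_pairwise (xs := ms) (key := fun x => x)
  rw [adjAll_eq_nodup _ hpw]
  simp [hperm.nodup_iff]

-- ===== VERDICT (by name: the statement is the Claim_ definition above) =====
theorem checkWarningsDontRepeat_spec : Claim_equal_checkWarningsDontRepeat := by
  intro out_ _
  exact checkWarningsDontRepeat_spec' out_
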